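-- pv_equiv track=rewrite | github.com/emanuellegrody/SALVEseq | extractionScripts/Python/fastq_read_lengths.py | find_polya_start
-- ===== SOURCE A (Python) =====
-- def find_polya_start(seq, min_a=8, search_window=100):
--     """
--     Find the start position of a polyA stretch near the end of the read.
--     This indicates a reverse-oriented 10X read: {insert}{polyA}{UMI}{barcode}
--
--     Returns the index where the polyA begins, or len(seq) if not found.
--     """
--     end_region = seq[-search_window:]
--     offset = len(seq) - len(end_region)
--
--     best_start = len(seq)
--     run_start = -1
--     run_len = 0
--
--     for i, base in enumerate(end_region):
--         if base == 'A':
--             if run_start < 0: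
--                 run_start = i
--             run_len += 1
--         else:
--             if run_len >= min_a:
--                 best_start = offset + run_start
--             run_start = -1
--             run_len = 0
--
--     if run_len >= min_a:
--         best_start = offset + run_start
--
--     return best_start
-- ===== SOURCE B (Python) =====
-- def find_polya_start(seq, min_a=8, search_window=100):
--     """Backward scan: walk the search window from its end and return the first
--     (i.e. last-positioned) maximal A-run of length >= min_a, stopping early."""
--     end_region = seq[-search_window:]
--     offset = len(seq) - len(end_region)
--     j = len(end_region)
--     while j > 0:
--         if end_region[j - 1] != 'A':
--             j -= 1
--             continue
--         e = j
--         while j > 0 and end_region[j - 1] == 'A':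
--             j -= 1
--         if e - j >= min_a:
--             return offset + j
--     return len(seq)
-- ===== Notes on version B (the rewrite author's own statement) =====
-- stated objective: alternative
-- what changed: Replaces A's forward whole-window run/state-machine scan (best/run_start/run_len updated on every character) with a backward scan of the window that returns as soon as the first qualifying A-run seen from the end is found.
-- intended difference: When min_a <= 0 and the searched window does not end in the letter A, the final run_len>=min_a check of A fires with run_start=-1 and A returns offset-1 (an invalid position, e.g. -1); B returns the start of the last polyA run (every run qualifies when min_a <= 0) or len(seq) when there is none, which is the intended index-or-len(seq) result the docstring describes. — e.g. on find_polya_start("TTT", 0, 100): A returns -1, B returns 3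
import Mathlib
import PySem

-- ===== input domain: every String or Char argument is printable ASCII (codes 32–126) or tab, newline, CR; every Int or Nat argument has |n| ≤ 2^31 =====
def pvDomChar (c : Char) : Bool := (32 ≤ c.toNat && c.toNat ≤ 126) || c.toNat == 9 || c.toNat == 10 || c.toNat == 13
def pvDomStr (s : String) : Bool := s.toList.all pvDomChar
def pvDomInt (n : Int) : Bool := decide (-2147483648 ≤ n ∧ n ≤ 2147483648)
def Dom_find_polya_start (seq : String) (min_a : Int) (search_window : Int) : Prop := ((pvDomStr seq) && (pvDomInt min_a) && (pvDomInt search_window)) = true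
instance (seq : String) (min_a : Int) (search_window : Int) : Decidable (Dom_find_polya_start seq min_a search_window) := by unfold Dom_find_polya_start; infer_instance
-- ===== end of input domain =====

-- B replaces A's forward whole-window run/state-machine scan by a backward scan of the
-- window that returns at the first qualifying A-run seen from the end (objective: alternative).

-- ===== PORT A =====
-- the loop body of A (state = (best_start, run_start, run_len), item = (i, base))
def stepA (min_a offset : Int) (st : Int × Int × Int) (p : Int × Char) : Int × Int × Int :=
  if p.2 = 'A' then
    (st.1, if st.2.1 < 0 then p.1 else st.2.1, st.2.2 + 1)
  else
    (if st.2.2 ≥ min_a then offset + st.2.1 else st.1, -1, 0)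

def find_polya_start (seq : String) (min_a : Int) (search_window : Int) : Int :=
  let cs := seq.toList
  let end_region := PySem.List.slice cs (some (-search_window)) none
  let offset : Int := (cs.length : Int) - (end_region.length : Int)
  let s := (PySem.List.enumerate end_region 0).foldl (stepA min_a offset)
      ((cs.length : Int), -1, 0)
  if s.2.2 ≥ min_a then offset + s.2.1 else s.1

-- ===== PORT B =====
-- inner while: from j, step down past the trailing 'A's (Source B's `while j > 0 and end_region[j-1] == 'A'`)
def bRun (w : List Char) : Nat → Nat
  | 0 => 0
  | j + 1 => if w.getD j ' ' = 'A' then bRun w j else j + 1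

theorem bRun_le (w : List Char) (j : Nat) : bRun w j ≤ j := by
  induction j with
  | zero => simp [bRun]
  | succ j ih => simp only [bRun]; split <;> omega

-- outer while of Source B: scan backwards from index j; `some j'` = early return offset + j'
def bLoop (w : List Char) (min_a : Int) : Nat → Option Nat
  | 0 => none
  | j + 1 =>
    if w.getD j ' ' ≠ 'A' then bLoop w min_a j
    else
      let j' := bRun w (j + 1)
      if (((j : Int) + 1) - (j' : Int) ≥ min_a) then some j'
      else bLoop w min_a j'
  decreasing_by
    · omega
    · rename_i h1 _
      have hA : w.getD j ' ' = 'A' := not_not.mp h1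
      simp only [bRun, if_pos hA]
      exact Nat.lt_succ_of_le (bRun_le w j)

def find_polya_start_alt (seq : String) (min_a : Int) (search_window : Int) : Int :=
  let cs := seq.toList
  let end_region := PySem.List.slice cs (some (-search_window)) none
  let offset : Int := (cs.length : Int) - (end_region.length : Int)
  match bLoop end_region min_a end_region.length with
  | some j => offset + (j : Int)
  | none => (cs.length : Int)

-- ===== PRECONDITION & SPEC =====
-- When min_a ≤ 0 and the searched window does not end in 'A', A's final `run_len >= min_a`
-- check fires with run_start = -1 and A returns offset - 1 (e.g. -1 for a window at the
-- start of seq), which is not a valid run start; B returns the start of the last A-run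
-- (every run qualifies for min_a ≤ 0) or len(seq) if there is none, the intended value.
def D_find_polya_start (seq : String) (min_a : Int) (search_window : Int) : Prop :=
  min_a ≤ 0 ∧ (PySem.List.slice seq.toList (some (-search_window)) none).getLast? ≠ some 'A'
instance (seq : String) (min_a : Int) (search_window : Int) : Decidable (D_find_polya_start seq min_a search_window) := by unfold D_find_polya_start; infer_instance

def Spec_find_polya_start (seq : String) (min_a : Int) (search_window : Int) (out : Int) : Prop := ¬ D_find_polya_start seq min_a search_window → out = find_polya_start_alt seq min_a search_window
instance (seq : String) (min_a : Int) (search_window : Int) (out : Int) : Decidable (Spec_find_polya_start seq min_a search_window out) := by unfold Spec_find_polya_start; infer_instance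

def pvDiffWitness_find_polya_start : String × Int × Int := ("TTT", 0, 100)
def pvDiffWitnessOut_find_polya_start : Int × Int := (-1, 3)

-- ===== CLAIM (what is proved, stated in full; the proofs are below) =====
def Claim_unchanged_find_polya_start : Prop := ∀ (seq : String) (min_a : Int) (search_window : Int), Dom_find_polya_start seq min_a search_window → Spec_find_polya_start seq min_a search_window (find_polya_start seq min_a search_window)
def Claim_changed_find_polya_start : Prop := Dom_find_polya_start (pvDiffWitness_find_polya_start.1) (pvDiffWitness_find_polya_start.2.1) (pvDiffWitness_find_polya_start.2.2) ∧ D_find_polya_start (pvDiffWitness_find_polya_start.1) (pvDiffWitness_find_polya_start.2.1) (pvDiffWitness_find_polya_start.2.2) ∧ find_polya_start (pvDiffWitness_find_polya_start.1) (pvDiffWitness_find_polya_start.2.1) (pvDiffWitness_find_polya_start.2.2) = pvDiffWitnessOut_find_polya_start.1 ∧ find_polya_start_alt (pvDiffWitness_find_polya_start.1) (pvDiffWitness_find_polya_start.2.1) (pvDiffWitness_find_polya_start.2.2) = pvDiffWitnessOut_find_polya_start.2 ∧ pvDiffWitnessOut_find_polya_start.1 ≠ pvDiffWitnessOut_fi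nd_polya_start.2
def Claim_exact_find_polya_start : Prop := ∀ (seq : String) (min_a : Int) (search_window : Int), Dom_find_polya_start seq min_a search_window → D_find_polya_start seq min_a search_window → find_polya_start seq min_a search_window ≠ find_polya_start_alt seq min_a search_window

-- ===== LEMMAS AND PROOFS =====

-- length of the leading 'A'-run
def aRun (r : List Char) : Nat := (r.takeWhile (· = 'A')).length
-- length of the trailing 'A'-run
def tRun (w : List Char) : Nat := aRun w.reverse
-- A's run_start component of the state after scanning w
def rIdx (w : List Char) : Int := if tRun w = 0 then -1 else (w.length : Int) - (tRun w : Nat)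
-- A's best_start component, computed from the right (argument is the reversed window)
def bstR (m off : Int) : List Char → Int → Int
  | [], b => b
  | c :: r, b =>
    if c = 'A' then bstR m off r b
    else if (aRun r : Int) ≥ m then
      off + (if aRun r = 0 then -1 else ((r.length : Int) - (aRun r : Nat)))
    else bstR m off r b
def bstF (m off : Int) (w : List Char) (b : Int) : Int := bstR m off w.reverse b

theorem tRun_le_length (w : List Char) : tRun w ≤ w.length := by
  simpa [tRun, aRun] using (List.takeWhile_prefix (l := w.reverse) (· = 'A')).length_le

theorem tRun_append_singleton (v : List Char) (c : Char) :
    tRun (v ++ [c]) = if c = 'A' then tRun v + 1 else 0 := by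
  simp [tRun, aRun, List.takeWhile]
  split <;> simp_all

theorem tRun_ne_zero_iff (w : List Char) : tRun w ≠ 0 ↔ w.getLast? = some 'A' := by
  rw [← List.head?_reverse]
  unfold tRun aRun
  cases h : w.reverse with
  | nil => simp
  | cons c r =>
    by_cases hc : c = 'A' <;> simp [hc]

theorem bstF_append_singleton (m off : Int) (v : List Char) (c : Char) (b : Int) :
    bstF m off (v ++ [c]) b =
      if c = 'A' then bstF m off v b
      else if (tRun v : Int) ≥ m then off + rIdx v else bstF m off v b := by
  simp [bstF, bstR, tRun, rIdx]

-- characterization of A's foldl state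
theorem foldA_spec (m off : Int) (w : List Char) (b : Int) :
    (PySem.List.enumerate w 0).foldl (stepA m off) (b, -1, 0) =
      (bstF m off w b, rIdx w, ((tRun w : Nat) : Int)) := by
  induction w using List.reverseRecOn with
  | nil => simp [PySem.List.enumerate, bstF, bstR, rIdx, tRun, aRun]
  | append_singleton v c ih =>
    have hle := tRun_le_length v
    rw [PySem.List.enumerate_append, List.foldl_append, ih]
    simp only [PySem.List.enumerate_cons, PySem.List.enumerate_nil, List.foldl_cons,
      List.foldl_nil, stepA, bstF_append_singleton, tRun_append_singleton, rIdx]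
    by_cases hc : c = 'A'
    · by_cases ht : tRun v = 0 <;> simp [hc, ht]
      all_goals omega
    · simp [hc]

theorem bRun_spec (w : List Char) (j : Nat) (hj : j ≤ w.length) :
    bRun w j = j - tRun (w.take j) := by
  induction j with
  | zero => simp [bRun, tRun, aRun]
  | succ j ih =>
    have hjl : j < w.length := by omega
    have ht : w.take (j + 1) = w.take j ++ [w[j]] := by
      rw [List.take_add_one]; simp [List.getElem?_eq_getElem hjl]
    have hgd : w.getD j ' ' = w[j] := List.getD_eq_getElem w ' ' hjl
    have htl := tRun_le_length (w.take j)
    rw [List.length_take] at htl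
    simp only [bRun, ht, tRun_append_singleton, hgd]
    by_cases hA : w[j] = 'A' <;> simp [hA, ih (by omega)]

theorem bRun_append (v u : List Char) (j : Nat) (hj : j ≤ v.length) :
    bRun (v ++ u) j = bRun v j := by
  induction j with
  | zero => simp [bRun]
  | succ j ih =>
    have : j < v.length := by omega
    simp only [bRun, List.getD_append _ _ _ _ this, ih (by omega)]

theorem bLoop_append (v u : List Char) (m : Int) (j : Nat) (hj : j ≤ v.length) :
    bLoop (v ++ u) m j = bLoop v m j := by
  induction j using Nat.strong_induction_on with
  | _ j ih =>
    match j, hj with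
    | 0, _ => simp [bLoop]
    | jj + 1, hj =>
      have hjl : jj < v.length := by omega
      have hgd : (v ++ u).getD jj ' ' = v.getD jj ' ' := List.getD_append _ _ _ _ hjl
      rw [bLoop, bLoop, hgd, bRun_append v u (jj + 1) (by omega)]
      by_cases hA : v.getD jj ' ' = 'A'
      · have hlt : bRun v (jj + 1) < jj + 1 := by
          simp only [bRun, if_pos hA]; exact Nat.lt_succ_of_le (bRun_le v jj)
        simp only [hA]
        split
        · simp_all
        · simp only [ih _ hlt (by omega)]
      · rw [if_pos hA, if_pos hA]
        exact ih jj (by omega) (by omega)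

theorem bLoop_skip_short (v : List Char) (m : Int) (h : (tRun v : Int) < m) :
    bLoop v m v.length = bLoop v m (v.length - tRun v) := by
  by_cases ht : tRun v = 0
  · simp [ht]
  · have hlast : v.getLast? = some 'A' := (tRun_ne_zero_iff v).mp ht
    have hle := tRun_le_length v
    cases hl : v.length with
    | zero => simp_all [List.length_eq_zero_iff, tRun, aRun]
    | succ k =>
      have hkl : k < v.length := by omega
      have hgd : v.getD k ' ' = 'A' := by
        have h1 : v[k]? = some 'A' := by
          have h2 := List.getLast?_eq_getElem? (l := v)
          rw [hlast, hl] at h2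
          simpa using h2.symm
        rw [List.getElem?_eq_getElem hkl] at h1
        rw [List.getD_eq_getElem v ' ' hkl]
        exact Option.some.inj h1
      have hbr : bRun v (k + 1) = k + 1 - tRun v := by
        rw [bRun_spec v (k + 1) (by omega)]
        rw [List.take_of_length_le (by omega)]
      rw [bLoop]
      rw [if_neg (not_not_intro hgd)]
      simp only [hbr]
      rw [if_neg (by omega)]

-- the heart: A's answer (offset factored out) equals B's backward scan, away from the quirk
theorem main_eq (w : List Char) (m off b : Int)
    (hg : 0 < m ∨ w.getLast? = some 'A') :
    (if (tRun w : Int) ≥ m then off + rIdx w else bstF m off w b) =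
      (match bLoop w m w.length with
       | some j => off + (j : Int)
       | none => b) := by
  induction w using List.reverseRecOn generalizing b with
  | nil =>
    have hm : 0 < m := by
      rcases hg with h | h
      · exact h
      · simp at h
    simp only [bLoop, tRun, aRun, List.reverse_nil, List.takeWhile_nil, List.length_nil]
    rw [if_neg (by omega)]
    simp [bstF, bstR]
  | append_singleton v c ih =>
    have hle := tRun_le_length v
    have hlen : (v ++ [c]).length = v.length + 1 := by simp
    by_cases hc : c = 'A'
    · have hwt : tRun (v ++ [c]) = tRun v + 1 := by rw [tRun_append_singleton, if_pos hc]
      have hgd : (v ++ [c]).getD v.length ' ' = 'A' := by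
        have h1 : (v ++ [c])[v.length]? = some c := by simp
        have h2 : v.length < (v ++ [c]).length := by omega
        rw [List.getD_eq_getElem _ ' ' h2]
        rw [List.getElem?_eq_getElem h2] at h1
        rw [Option.some.inj h1, hc]
      have hbr : bRun (v ++ [c]) (v.length + 1) = v.length - tRun v := by
        rw [bRun_spec (v ++ [c]) (v.length + 1) (by omega)]
        rw [List.take_of_length_le (by omega), hwt]
        omega
      rw [hlen, bLoop, if_neg (not_not_intro hgd)]
      simp only [hbr]
      by_cases hm : ((tRun v : Int) + 1 ≥ m)
      · rw [if_pos (show (tRun (v ++ [c]) : Int) ≥ m by rw [hwt]; omega)]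
        rw [if_pos (show ((v.length : Int) + 1 - ((v.length - tRun v : Nat) : Int) ≥ m) by omega)]
        rw [rIdx, if_neg (by omega), hwt, hlen]
        show off + (((v.length + 1 : Nat) : Int) - ((tRun v + 1 : Nat) : Int)) =
          off + ((v.length - tRun v : Nat) : Int)
        omega
      · rw [if_neg (show ¬ (tRun (v ++ [c]) : Int) ≥ m by rw [hwt]; omega)]
        rw [if_neg (show ¬ ((v.length : Int) + 1 - ((v.length - tRun v : Nat) : Int) ≥ m) by omega)]
        rw [bstF_append_singleton, if_pos hc]
        rw [bLoop_append v [c] m _ (by omega)]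
        have hskip : bLoop v m (v.length - tRun v) = bLoop v m v.length := by
          rw [← bLoop_skip_short v m (by omega)]
        rw [hskip]
        have hgood : 0 < m ∨ v.getLast? = some 'A' := Or.inl (by omega)
        rw [← ih b hgood]
        rw [if_neg (by omega)]
    · have hm : 0 < m := by
        rcases hg with h | h
        · exact h
        · rw [List.getLast?_concat] at h
          exact absurd (Option.some.inj h) hc
      have hwt : tRun (v ++ [c]) = 0 := by rw [tRun_append_singleton, if_neg hc]
      have hgd : ¬ (v ++ [c]).getD v.length ' ' = 'A' := by
        have h1 : (v ++ [c])[v.length]? = some c := by simp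
        have h2 : v.length < (v ++ [c]).length := by omega
        rw [List.getD_eq_getElem _ ' ' h2]
        rw [List.getElem?_eq_getElem h2] at h1
        rw [Option.some.inj h1]
        exact hc
      rw [hlen, bLoop, if_pos hgd]
      rw [bLoop_append v [c] m _ (by omega)]
      rw [← ih b (Or.inl hm)]
      rw [if_neg (by rw [hwt]; omega)]
      rw [bstF_append_singleton, if_neg hc]

-- ===== VERDICT (by name: the statement is the Claim_ definition above) =====
theorem find_polya_start_spec : Claim_unchanged_find_polya_start := by
  intro seq m sw _ hnd
  have hgood : 0 < m ∨
      (PySem.List.slice seq.toList (some (-sw)) none).getLast? = some 'A' := by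
    rcases not_and_or.mp hnd with h | h
    · exact Or.inl (by omega)
    · exact Or.inr (not_not.mp h)
  show find_polya_start seq m sw = find_polya_start_alt seq m sw
  simp only [find_polya_start, find_polya_start_alt, foldA_spec]
  exact main_eq _ m _ _ hgood

theorem find_polya_start_changed : Claim_changed_find_polya_start := by
  unfold Claim_changed_find_polya_start
  refine ⟨by decide, by decide, by decide, ?_, by decide⟩
  show find_polya_start_alt "TTT" 0 100 = 3
  have hw : PySem.List.slice "TTT".toList (some (-(100 : Int))) none = ['T', 'T', 'T'] := by
    decide
  have hTA : ('T' = 'A') = False := by decide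
  simp only [find_polya_start_alt, hw]
  simp [bLoop, hTA, List.getD]

theorem find_polya_start_tight : Claim_exact_find_polya_start := by
  intro seq m sw _ hd
  obtain ⟨hm, hlast⟩ := hd
  have ht0 : tRun (PySem.List.slice seq.toList (some (-sw)) none) = 0 := by
    by_contra h
    exact hlast ((tRun_ne_zero_iff _).mp h)
  simp only [find_polya_start, find_polya_start_alt, foldA_spec]
  rw [if_pos (show ((tRun (PySem.List.slice seq.toList (some (-sw)) none) : Nat) : Int) ≥ m by
    rw [ht0]; simpa using hm)]
  rw [rIdx, if_pos ht0]
  rcases h : bLoop (PySem.List.slice seq.toList (some (-sw)) none) m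
      (PySem.List.slice seq.toList (some (-sw)) none).length with _ | j <;> simp
  all_goals omega
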